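-- pv_equiv track=rewrite | github.com/XUER1220/GameLLM-Benchmark | data/raw/20260430_115101/tetris_amazon.nova-pro-v1_0.py | join_matrices
-- ===== SOURCE A (Python) =====
-- BOARD_WIDTH = 10
--
-- BOARD_HEIGHT = 20
--
-- def join_matrices(mat1, mat2, mat2_off):
--     def inside(rect):
--         ((x, y), (w, h)) = rect
--         return 0 <= x < BOARD_WIDTH and 0 <= y < BOARD_HEIGHT
--
--     (off_x, off_y) = mat2_off
--     for cy, row in enumerate(mat2):
--         for cx, cell in enumerate(row):
--             if inside(((cx + off_x, cy + off_y), (1, 1))) and cell: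
--                 mat1[cy + off_y][cx + off_x] = cell
--     return mat1
-- ===== SOURCE B (Python) =====
-- BOARD_WIDTH = 10
--
-- BOARD_HEIGHT = 20
--
-- def join_matrices(mat1, mat2, mat2_off):
--     # Gather instead of scatter: build a fresh matrix where each cell of mat1
--     # pulls its overlaying value from mat2 (if that source exists and is truthy).
--     # Does not mutate mat1 (A does); same return value.
--     (off_x, off_y) = mat2_off
--
--     def pick(y, x, old):
--         if 0 <= x < BOARD_WIDTH and 0 <= y < BOARD_HEIGHT:
--             sy = y - off_y
--             sx = x - off_x
--             if 0 <= sy < len(mat2) and 0 <= sx < len(mat2[sy]) and mat2[sy][sx]: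
--                 return mat2[sy][sx]
--         return old
--     return [[pick(y, x, old) for x, old in enumerate(row)]
--             for y, row in enumerate(mat1)]
-- ===== Notes on version B (the rewrite author's own statement) =====
-- stated objective: alternative
-- what changed: A scatters: it walks every cell of mat2 and writes truthy in-board cells into mat1 in place; B gathers: it builds a fresh matrix by mapping over mat1's cells, each cell pulling its value from the corresponding mat2 source position (or keeping the old value), so the write loop and per-write bounds test disappear. B does not mutate mat1.
-- outside the precondition, e.g. on join_matrices([[0]], [[1]], (3, 0)): A raises IndexError, B returns [[0]]
import Mathlib
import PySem

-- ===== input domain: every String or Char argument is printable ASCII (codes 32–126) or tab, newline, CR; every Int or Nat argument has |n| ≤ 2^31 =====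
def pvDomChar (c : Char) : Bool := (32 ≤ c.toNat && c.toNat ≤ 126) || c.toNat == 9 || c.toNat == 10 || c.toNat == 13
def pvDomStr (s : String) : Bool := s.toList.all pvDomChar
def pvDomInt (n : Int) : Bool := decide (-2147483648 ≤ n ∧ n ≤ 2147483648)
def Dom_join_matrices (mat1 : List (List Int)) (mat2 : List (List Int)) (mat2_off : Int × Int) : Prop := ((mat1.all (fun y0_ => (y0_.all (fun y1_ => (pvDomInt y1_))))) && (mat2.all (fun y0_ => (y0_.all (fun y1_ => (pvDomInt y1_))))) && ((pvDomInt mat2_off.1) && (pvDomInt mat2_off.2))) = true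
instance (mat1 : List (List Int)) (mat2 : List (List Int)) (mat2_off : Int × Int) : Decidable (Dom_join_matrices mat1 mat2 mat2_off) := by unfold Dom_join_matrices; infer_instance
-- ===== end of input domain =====

-- B replaces A's scatter (walk mat2, write truthy in-board cells into mat1 in place)
-- by a gather (map over mat1's cells, each pulling its value from the matching mat2
-- source cell). Equivalence is about the return value: A mutates mat1, B does not.

-- A-side helper for the Python statement 'mat1[y][x] = v' (row fetched, cell set, row stored)
def setCell (m : List (List Int)) (y x v : Int) : List (List Int) :=
  PySem.List.pySetD m y (PySem.List.pySetD (PySem.List.pyGetD m y []) x v)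

-- A-side helper: the body of A's inner loop over one row (target row t = cy + off_y)
def innerStep (o1 t : Int) (m : List (List Int)) (cp : Int × Int) : List (List Int) :=
  if (0 ≤ cp.1 + o1 ∧ cp.1 + o1 < 10 ∧ 0 ≤ t ∧ t < 20) ∧ cp.2 ≠ 0
  then setCell m t (cp.1 + o1) cp.2 else m

-- ===== PORT A =====
def join_matrices (mat1 : List (List Int)) (mat2 : List (List Int)) (mat2_off : Int × Int) : List (List Int) :=
  (PySem.List.enumerate mat2 0).foldl (fun m1 rp =>
    (PySem.List.enumerate rp.2 0).foldl (innerStep mat2_off.1 (rp.1 + mat2_off.2)) m1) mat1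

-- ===== PORT B =====
-- B-side helper: Source B's 'pick(y, x, old)'
def pickCell (mat2 : List (List Int)) (off_x off_y y x old : Int) : Int :=
  if 0 ≤ x ∧ x < 10 ∧ 0 ≤ y ∧ y < 20 then
    if 0 ≤ y - off_y ∧ y - off_y < (mat2.length : Int) ∧
       0 ≤ x - off_x ∧ x - off_x < ((PySem.List.pyGetD mat2 (y - off_y) []).length : Int) ∧
       PySem.List.pyGetD (PySem.List.pyGetD mat2 (y - off_y) []) (x - off_x) 0 ≠ 0
    then PySem.List.pyGetD (PySem.List.pyGetD mat2 (y - off_y) []) (x - off_x) 0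
    else old
  else old

def join_matrices_alt (mat1 : List (List Int)) (mat2 : List (List Int)) (mat2_off : Int × Int) : List (List Int) :=
  (PySem.List.enumerate mat1 0).map (fun yp =>
    (PySem.List.enumerate yp.2 0).map (fun xp =>
      pickCell mat2 mat2_off.1 mat2_off.2 yp.1 xp.1 xp.2))

-- ===== PRECONDITION & SPEC =====
-- Pre_ excludes exactly the inputs on which Python A raises IndexError: some in-board,
-- truthy cell of mat2 lands at a row/column index outside mat1's actual (ragged) shape.
def Pre_join_matrices (mat1 : List (List Int)) (mat2 : List (List Int)) (mat2_off : Int × Int) : Prop :=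
  ∀ cy < mat2.length, ∀ cx < (mat2.getD cy []).length,
    (0 ≤ (cx : Int) + mat2_off.1 ∧ (cx : Int) + mat2_off.1 < 10 ∧
     0 ≤ (cy : Int) + mat2_off.2 ∧ (cy : Int) + mat2_off.2 < 20 ∧
     (mat2.getD cy []).getD cx 0 ≠ 0) →
    ((cy : Int) + mat2_off.2).toNat < mat1.length ∧
    ((cx : Int) + mat2_off.1).toNat < (mat1.getD ((cy : Int) + mat2_off.2).toNat []).length
instance (mat1 : List (List Int)) (mat2 : List (List Int)) (mat2_off : Int × Int) : Decidable (Pre_join_matrices mat1 mat2 mat2_off) := by unfold Pre_join_matrices; infer_instance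

def pvWitness_join_matrices : List (List Int) × List (List Int) × (Int × Int) :=
  ([[0, 0], [0, 0]], [[1, 2], [0, 3]], (0, 0))

def Spec_join_matrices (mat1 : List (List Int)) (mat2 : List (List Int)) (mat2_off : Int × Int) (out : List (List Int)) : Prop := out = join_matrices_alt mat1 mat2 mat2_off
instance (mat1 : List (List Int)) (mat2 : List (List Int)) (mat2_off : Int × Int) (out : List (List Int)) : Decidable (Spec_join_matrices mat1 mat2 mat2_off out) := by unfold Spec_join_matrices; infer_instance

-- ===== CLAIM (what is proved, stated in full; the proofs are below) =====
def Claim_equal_join_matrices : Prop := ∀ (mat1 : List (List Int)) (mat2 : List (List Int)) (mat2_off : Int × Int), Dom_join_matrices mat1 mat2 mat2_off → Pre_join_matrices mat1 mat2 mat2_off → Spec_join_matrices mat1 mat2 mat2_off (join_matrices mat1 mat2 mat2_off)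

-- ===== LEMMAS AND PROOFS =====

-- cell / row-length accessors used by the invariants
def cellAt (m : List (List Int)) (i j : Nat) : Int := (m.getD i []).getD j 0
def rowLen (m : List (List Int)) (i : Nat) : Nat := (m.getD i []).length

theorem getD_set' {α : Type} (xs : List α) (n i : Nat) (v d : α) :
    (xs.set n v).getD i d = if i = n ∧ n < xs.length then v else xs.getD i d := by
  rcases Nat.lt_or_ge i xs.length with h | h
  · rw [List.getD_eq_getElem _ _ (by simpa using h), List.getD_eq_getElem _ _ h,
      List.getElem_set]
    split_ifs with h1 h2 h3 <;> first | rfl | omega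
  · rw [List.getD_eq_default _ _ (by simpa using h), List.getD_eq_default _ _ h, if_neg (by omega)]

theorem pyGetD_cons_pos {α : Type} (a : α) (r : List α) (s : Int) (d : α) (hs : 1 ≤ s) :
    PySem.List.pyGetD (a :: r) s d = PySem.List.pyGetD r (s - 1) d := by
  obtain ⟨k, rfl⟩ : ∃ k : Nat, s = ((k : Int) + 1) := ⟨(s - 1).toNat, by omega⟩
  have h1 : (k : Int) + 1 = ((k + 1 : Nat) : Int) := by push_cast; ring
  rw [h1, PySem.List.pyGetD_natCast]
  have h2 : ((k + 1 : Nat) : Int) - 1 = ((k : Nat) : Int) := by push_cast; ring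
  rw [h2, PySem.List.pyGetD_natCast, List.getD_cons_succ]

theorem setCell_eq (m : List (List Int)) (t x v : Int) (ht : 0 ≤ t) (hx : 0 ≤ x) :
    setCell m t x v = m.set t.toNat ((m.getD t.toNat []).set x.toNat v) := by
  unfold setCell
  rw [PySem.List.pySetD_of_nonneg _ _ ht, PySem.List.pySetD_of_nonneg _ _ hx]
  have h1 : t = ((t.toNat : Nat) : Int) := by omega
  conv_lhs => rw [h1]
  rw [PySem.List.pyGetD_natCast]
  simp only [Int.toNat_natCast]

theorem setCell_length (m : List (List Int)) (t x v : Int) :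
    (setCell m t x v).length = m.length := by
  unfold setCell
  rw [PySem.List.length_pySetD]

theorem setCell_rowLen (m : List (List Int)) (t x v : Int) (ht : 0 ≤ t) (hx : 0 ≤ x) (i : Nat) :
    rowLen (setCell m t x v) i = rowLen m i := by
  unfold rowLen
  rw [setCell_eq m t x v ht hx, getD_set']
  split_ifs with h
  · rw [List.length_set, h.1]
  · rfl

theorem setCell_cell (m : List (List Int)) (t x v : Int) (ht : 0 ≤ t) (hx : 0 ≤ x) (i j : Nat) :
    cellAt (setCell m t x v) i j =
      if (i : Int) = t ∧ (j : Int) = x ∧ i < m.length ∧ j < rowLen m i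
      then v else cellAt m i j := by
  unfold cellAt rowLen
  rw [setCell_eq m t x v ht hx, getD_set']
  by_cases h1 : i = t.toNat ∧ t.toNat < m.length
  · rw [if_pos h1, h1.1, getD_set']
    split_ifs with h2 h3 h3 <;> first | rfl | omega
  · rw [if_neg h1, if_neg (by omega)]

theorem innerStep_length (o1 t : Int) (m : List (List Int)) (cp : Int × Int) :
    (innerStep o1 t m cp).length = m.length := by
  unfold innerStep
  split_ifs with h
  · exact setCell_length _ _ _ _
  · rfl

theorem innerStep_rowLen (o1 t : Int) (m : List (List Int)) (cp : Int × Int) (i : Nat) :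
    rowLen (innerStep o1 t m cp) i = rowLen m i := by
  unfold innerStep
  split_ifs with h
  · exact setCell_rowLen _ _ _ _ h.1.2.2.1 h.1.1 i
  · rfl

theorem foldl_innerStep_length (o1 t : Int) (l : List (Int × Int)) (m : List (List Int)) :
    (l.foldl (innerStep o1 t) m).length = m.length := by
  induction l generalizing m with
  | nil => rfl
  | cons a l ih => rw [List.foldl_cons, ih, innerStep_length]

theorem foldl_innerStep_rowLen (o1 t : Int) (l : List (Int × Int)) (m : List (List Int)) (i : Nat) :
    rowLen (l.foldl (innerStep o1 t) m) i = rowLen m i := by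
  induction l generalizing m with
  | nil => rfl
  | cons a l ih => rw [List.foldl_cons, ih, innerStep_rowLen]

-- the invariant of A's inner loop: its effect on one cell, for any start index c
theorem inner_cells (o1 t : Int) (r : List Int) :
    ∀ (c : Int) (m : List (List Int)) (i j : Nat),
    cellAt ((PySem.List.enumerate r c).foldl (innerStep o1 t) m) i j =
      if (i : Int) = t ∧ t < 20 ∧ (j : Int) < 10 ∧
         c ≤ (j : Int) - o1 ∧ (j : Int) - o1 < c + r.length ∧
         i < m.length ∧ j < rowLen m i ∧
         PySem.List.pyGetD r ((j : Int) - o1 - c) 0 ≠ 0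
      then PySem.List.pyGetD r ((j : Int) - o1 - c) 0
      else cellAt m i j := by
  induction r with
  | nil =>
    intro c m i j
    rw [PySem.List.enumerate_nil, List.foldl_nil, if_neg]
    rintro ⟨-, -, -, h4, h5, -⟩
    simp only [List.length_nil, Nat.cast_zero] at h5
    omega
  | cons a r ih =>
    intro c m i j
    rw [PySem.List.enumerate_cons, List.foldl_cons, ih (c + 1) (innerStep o1 t m (c, a)) i j,
      innerStep_length, innerStep_rowLen]
    have hlen : ((a :: r).length : Int) = (r.length : Int) + 1 := by
      simp [List.length_cons]
    by_cases hK0 : (j : Int) - o1 = c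
    · -- the head element is the one that may write to column j
      rw [if_neg (by rintro ⟨-, -, -, h4, -⟩; omega)]
      have hidx : (j : Int) - o1 - c = 0 := by omega
      rw [hidx, PySem.List.pyGetD_zero_cons]
      show cellAt (innerStep o1 t m (c, a)) i j = _
      unfold innerStep
      by_cases hg : (0 ≤ c + o1 ∧ c + o1 < 10 ∧ 0 ≤ t ∧ t < 20) ∧ a ≠ 0
      · rw [if_pos hg, setCell_cell _ _ _ _ hg.1.2.2.1 hg.1.1 i j]
        by_cases hw : (i : Int) = t ∧ (j : Int) = c + o1 ∧ i < m.length ∧ j < rowLen m i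
        · rw [if_pos hw, if_pos ⟨hw.1, hg.1.2.2.2, by omega, by omega, by omega,
            hw.2.2.1, hw.2.2.2, hg.2⟩]
        · rw [if_neg hw, if_neg]
          rintro ⟨h1, -, h3, -, -, h6, h7, -⟩
          exact hw ⟨h1, by omega, h6, h7⟩
      · rw [if_neg hg, if_neg]
        rintro ⟨h1, h2, h3, -, -, -, -, h8⟩
        exact hg ⟨⟨by omega, by omega, by omega, h2⟩, h8⟩
    · -- the head element writes (if at all) to a column ≠ j
      have hm1 : cellAt (innerStep o1 t m (c, a)) i j = cellAt m i j := by
        unfold innerStep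
        split_ifs with hg
        · rw [setCell_cell _ _ _ _ hg.1.2.2.1 hg.1.1 i j, if_neg]
          rintro ⟨-, h2, -⟩
          omega
        · rfl
      rw [hm1]
      by_cases hc : c + 1 ≤ (j : Int) - o1 ∧ (j : Int) - o1 < c + 1 + r.length
      · have hidx : (j : Int) - o1 - c - 1 = (j : Int) - o1 - (c + 1) := by ring
        have hcons := pyGetD_cons_pos a r ((j : Int) - o1 - c) 0 (by omega)
        rw [hidx] at hcons
        by_cases hp : (i : Int) = t ∧ t < 20 ∧ (j : Int) < 10 ∧ i < m.length ∧
            j < rowLen m i ∧ PySem.List.pyGetD r ((j : Int) - o1 - (c + 1)) 0 ≠ 0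
        · obtain ⟨p1, p2, p3, p4, p5, p6⟩ := hp
          rw [if_pos ⟨p1, p2, p3, by omega, by omega, p4, p5, p6⟩, hcons,
            if_pos ⟨p1, p2, p3, by omega, by omega, p4, p5, p6⟩]
        · rw [if_neg (by rintro ⟨q1, q2, q3, -, -, q6, q7, q8⟩; exact hp ⟨q1, q2, q3, q6, q7, q8⟩),
            if_neg]
          rintro ⟨q1, q2, q3, -, -, q6, q7, q8⟩
          rw [hcons] at q8
          exact hp ⟨q1, q2, q3, q6, q7, q8⟩
      · rw [if_neg (by rintro ⟨-, -, -, h4, h5, -⟩; omega), if_neg]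
        rintro ⟨-, -, -, h4, h5, -⟩
        rw [hlen] at h5
        omega

-- the invariant of A's outer loop, for any start row index s
theorem outer_cells (o1 o2 : Int) (rows : List (List Int)) :
    ∀ (s : Int) (m : List (List Int)) (i j : Nat),
    cellAt ((PySem.List.enumerate rows s).foldl (fun m1 rp =>
        (PySem.List.enumerate rp.2 0).foldl (innerStep o1 (rp.1 + o2)) m1) m) i j =
      if (i : Int) < 20 ∧ (j : Int) < 10 ∧
         s ≤ (i : Int) - o2 ∧ (i : Int) - o2 < s + rows.length ∧
         0 ≤ (j : Int) - o1 ∧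
         (j : Int) - o1 < ((PySem.List.pyGetD rows ((i : Int) - o2 - s) []).length : Int) ∧
         i < m.length ∧ j < rowLen m i ∧
         PySem.List.pyGetD (PySem.List.pyGetD rows ((i : Int) - o2 - s) []) ((j : Int) - o1) 0 ≠ 0
      then PySem.List.pyGetD (PySem.List.pyGetD rows ((i : Int) - o2 - s) []) ((j : Int) - o1) 0
      else cellAt m i j := by
  induction rows with
  | nil =>
    intro s m i j
    rw [PySem.List.enumerate_nil, List.foldl_nil, if_neg]
    rintro ⟨-, -, h3, h4, -⟩
    simp only [List.length_nil, Nat.cast_zero] at h4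
    omega
  | cons r rows ih =>
    intro s m i j
    rw [PySem.List.enumerate_cons, List.foldl_cons, ih (s + 1) _ i j,
      foldl_innerStep_length, foldl_innerStep_rowLen]
    have hlen : ((r :: rows).length : Int) = (rows.length : Int) + 1 := by
      simp [List.length_cons]
    by_cases hK0 : (i : Int) - o2 = s
    · -- the head row is the one that may write to row i
      rw [if_neg (by rintro ⟨-, -, h3, -⟩; omega)]
      have hidx : (i : Int) - o2 - s = 0 := by omega
      rw [hidx, PySem.List.pyGetD_zero_cons,
        inner_cells o1 (s + o2) r 0 m i j, sub_zero, zero_add]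
      by_cases hp : (j : Int) < 10 ∧ 0 ≤ (j : Int) - o1 ∧ (j : Int) - o1 < (r.length : Int) ∧
          i < m.length ∧ j < rowLen m i ∧
          PySem.List.pyGetD r ((j : Int) - o1) 0 ≠ 0 ∧ (i : Int) < 20
      · obtain ⟨p1, p2, p3, p4, p5, p6, p7⟩ := hp
        rw [if_pos ⟨by omega, by omega, p1, p2, p3, p4, p5, p6⟩,
          if_pos ⟨p7, p1, by omega, by omega, p2, p3, p4, p5, p6⟩]
      · rw [if_neg (by rintro ⟨q1, q2, q3, q4, q5, q6, q7, q8⟩; exact hp ⟨q3, q4, q5, q6, q7, q8, by omega⟩),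
          if_neg]
        rintro ⟨q1, q2, -, -, q5, q6, q7, q8, q9⟩
        exact hp ⟨q2, q5, q6, q7, q8, q9, q1⟩
    · -- the head row writes (if at all) to a row ≠ i
      have hm1 : cellAt ((PySem.List.enumerate r 0).foldl (innerStep o1 (s + o2)) m) i j
          = cellAt m i j := by
        rw [inner_cells o1 (s + o2) r 0 m i j, if_neg]
        rintro ⟨q1, -⟩
        omega
      rw [hm1]
      by_cases hc : s + 1 ≤ (i : Int) - o2 ∧ (i : Int) - o2 < s + 1 + rows.length
      · have hidx : (i : Int) - o2 - s - 1 = (i : Int) - o2 - (s + 1) := by ring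
        have hcons := pyGetD_cons_pos r rows ((i : Int) - o2 - s) [] (by omega)
        rw [hidx] at hcons
        by_cases hp : (i : Int) < 20 ∧ (j : Int) < 10 ∧ 0 ≤ (j : Int) - o1 ∧
            (j : Int) - o1 < ((PySem.List.pyGetD rows ((i : Int) - o2 - (s + 1)) []).length : Int) ∧
            i < m.length ∧ j < rowLen m i ∧
            PySem.List.pyGetD (PySem.List.pyGetD rows ((i : Int) - o2 - (s + 1)) []) ((j : Int) - o1) 0 ≠ 0
        · obtain ⟨p1, p2, p3, p4, p5, p6, p7⟩ := hp
          rw [if_pos ⟨p1, p2, by omega, by omega, p3, p4, p5, p6, p7⟩, hcons,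
            if_pos ⟨p1, p2, by omega, by omega, p3, p4, p5, p6, p7⟩]
        · rw [if_neg (by rintro ⟨q1, q2, -, -, q5, q6, q7, q8, q9⟩; exact hp ⟨q1, q2, q5, q6, q7, q8, q9⟩),
            if_neg]
          rintro ⟨q1, q2, -, -, q5, q6, q7, q8, q9⟩
          rw [hcons] at q6 q9
          exact hp ⟨q1, q2, q5, q6, q7, q8, q9⟩
      · rw [if_neg (by rintro ⟨-, -, h3, h4, -⟩; omega), if_neg]
        rintro ⟨-, -, h3, h4, -⟩
        rw [hlen] at h4
        omega

theorem outer_length (o1 o2 : Int) (rows : List (List Int)) (s : Int) (m : List (List Int)) :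
    ((PySem.List.enumerate rows s).foldl (fun m1 rp =>
        (PySem.List.enumerate rp.2 0).foldl (innerStep o1 (rp.1 + o2)) m1) m).length = m.length := by
  induction rows generalizing s m with
  | nil => rfl
  | cons r rows ih =>
    rw [PySem.List.enumerate_cons, List.foldl_cons, ih, foldl_innerStep_length]

theorem outer_rowLen (o1 o2 : Int) (rows : List (List Int)) (s : Int) (m : List (List Int)) (i : Nat) :
    rowLen ((PySem.List.enumerate rows s).foldl (fun m1 rp =>
        (PySem.List.enumerate rp.2 0).foldl (innerStep o1 (rp.1 + o2)) m1) m) i = rowLen m i := by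
  induction rows generalizing s m with
  | nil => rfl
  | cons r rows ih =>
    rw [PySem.List.enumerate_cons, List.foldl_cons, ih, foldl_innerStep_rowLen]

-- B characterized cellwise
theorem alt_length (mat1 mat2 : List (List Int)) (off : Int × Int) :
    (join_matrices_alt mat1 mat2 off).length = mat1.length := by
  unfold join_matrices_alt
  rw [List.length_map, PySem.List.length_enumerate]

theorem map_enumerate_getD {α β : Type} (xs : List α) (f : Int × α → β) (i : Nat)
    (hi : i < xs.length) (d : β) :
    ((PySem.List.enumerate xs 0).map f).getD i d = f ((i : Int), xs[i]) := by
  rw [List.getD_eq_getElem _ _ (by rw [List.length_map, PySem.List.length_enumerate]; exact hi),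
    List.getElem_map, PySem.List.getElem_enumerate, zero_add]

theorem alt_rowLen (mat1 mat2 : List (List Int)) (off : Int × Int) (i : Nat) (hi : i < mat1.length) :
    rowLen (join_matrices_alt mat1 mat2 off) i = rowLen mat1 i := by
  unfold rowLen join_matrices_alt
  rw [map_enumerate_getD _ _ i hi, List.length_map, PySem.List.length_enumerate,
    List.getD_eq_getElem _ _ hi]

theorem alt_cell (mat1 mat2 : List (List Int)) (off : Int × Int) (i j : Nat)
    (hi : i < mat1.length) (hj : j < rowLen mat1 i) :
    cellAt (join_matrices_alt mat1 mat2 off) i j =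
      pickCell mat2 off.1 off.2 i j (cellAt mat1 i j) := by
  unfold cellAt join_matrices_alt
  rw [map_enumerate_getD _ _ i hi]
  have hj' : j < mat1[i].length := by
    have : rowLen mat1 i = mat1[i].length := by
      unfold rowLen; rw [List.getD_eq_getElem _ _ hi]
    omega
  rw [map_enumerate_getD _ _ j hj', List.getD_eq_getElem _ _ hi,
    List.getD_eq_getElem _ _ hj']

-- ===== VERDICT (by name: the statement is the Claim_ definition above) =====
theorem cellAt_eq_getElem (m : List (List Int)) (i j : Nat) (h1 : i < m.length)
    (h2 : j < m[i].length) : cellAt m i j = m[i][j] := by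
  unfold cellAt
  rw [List.getD_eq_getElem _ _ h1, List.getD_eq_getElem _ _ h2]

theorem join_matrices_spec : Claim_equal_join_matrices := by
  intro mat1 mat2 off _ _
  unfold Spec_join_matrices
  have hA : (join_matrices mat1 mat2 off).length = mat1.length := by
    unfold join_matrices
    exact outer_length off.1 off.2 mat2 0 mat1
  refine List.ext_getElem (by rw [hA, alt_length]) ?_
  intro i h1 h2
  have hi : i < mat1.length := by omega
  have hArl : rowLen (join_matrices mat1 mat2 off) i = rowLen mat1 i := by
    unfold join_matrices
    exact outer_rowLen off.1 off.2 mat2 0 mat1 i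
  have hgd : (join_matrices mat1 mat2 off)[i] = (join_matrices mat1 mat2 off).getD i [] :=
    (List.getD_eq_getElem _ _ h1).symm
  have hgd' : (join_matrices_alt mat1 mat2 off)[i] = (join_matrices_alt mat1 mat2 off).getD i [] :=
    (List.getD_eq_getElem _ _ h2).symm
  have hlen : ((join_matrices mat1 mat2 off)[i]).length = rowLen mat1 i := by
    rw [hgd]; exact hArl
  have hlen' : ((join_matrices_alt mat1 mat2 off)[i]).length = rowLen mat1 i := by
    rw [hgd']; exact alt_rowLen mat1 mat2 off i hi
  refine List.ext_getElem (by rw [hlen, hlen']) ?_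
  intro j hj1 hj2
  have hj : j < rowLen mat1 i := by omega
  have eA : (join_matrices mat1 mat2 off)[i][j] = cellAt (join_matrices mat1 mat2 off) i j :=
    (cellAt_eq_getElem _ i j h1 hj1).symm
  have eB : (join_matrices_alt mat1 mat2 off)[i][j] = cellAt (join_matrices_alt mat1 mat2 off) i j :=
    (cellAt_eq_getElem _ i j h2 hj2).symm
  rw [eA, eB, alt_cell mat1 mat2 off i j hi hj]
  unfold join_matrices
  rw [outer_cells off.1 off.2 mat2 0 mat1 i j]
  simp only [zero_add, sub_zero]
  unfold pickCell
  by_cases hCA : (i : Int) < 20 ∧ (j : Int) < 10 ∧ 0 ≤ (i : Int) - off.2 ∧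
      (i : Int) - off.2 < (mat2.length : Int) ∧ 0 ≤ (j : Int) - off.1 ∧
      (j : Int) - off.1 < ((PySem.List.pyGetD mat2 ((i : Int) - off.2) []).length : Int) ∧
      i < mat1.length ∧ j < rowLen mat1 i ∧
      PySem.List.pyGetD (PySem.List.pyGetD mat2 ((i : Int) - off.2) []) ((j : Int) - off.1) 0 ≠ 0
  · obtain ⟨p1, p2, p3, p4, p5, p6, p7, p8, p9⟩ := hCA
    rw [if_pos ⟨p1, p2, p3, p4, p5, p6, p7, p8, p9⟩,
      if_pos ⟨by omega, p2, by omega, p1⟩, if_pos ⟨p3, p4, p5, p6, p9⟩]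
  · rw [if_neg hCA]
    split_ifs with b1 b2
    · exact absurd ⟨b1.2.2.2, b1.2.1, b2.1, b2.2.1, b2.2.2.1, b2.2.2.2.1, hi, hj,
        b2.2.2.2.2⟩ hCA
    · rfl
    · rfl
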